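-- pv_equiv track=rewrite | github.com/AvichalDwivedi2205/Innerverse | agents/nutrition_agent/budget_optimizer.py | _identify_expensive_ingredients
-- ===== SOURCE A (Python) =====
-- from typing import Dict, List, Optional, Any
--
-- def _identify_expensive_ingredients(ingredients: List[str]) -> List[str]:
--     """Identify potentially expensive ingredients."""
--
--     expensive_keywords = [
--         'salmon', 'tuna', 'shrimp', 'lobster', 'crab',
--         'beef', 'steak', 'lamb', 'veal',
--         'organic', 'grass-fed', 'free-range',
--         'pine nuts', 'cashews', 'macadamia',
--         'truffle', 'saffron', 'vanilla bean',
--         'fresh herbs', 'specialty cheese'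
--     ]
--
--     expensive_items = []
--     for ingredient in ingredients:
--         ingredient_lower = ingredient.lower()
--         for keyword in expensive_keywords:
--             if keyword in ingredient_lower:
--                 expensive_items.append(ingredient)
--                 break
--
--     return expensive_items
-- ===== SOURCE B (Python) =====
-- def _identify_expensive_ingredients(ingredients):
--     """Identify potentially expensive ingredients (position-major scan)."""
--     keywords = (
--         'salmon', 'tuna', 'shrimp', 'lobster', 'crab',
--         'beef', 'steak', 'lamb', 'veal',
--         'organic', 'grass-fed', 'free-range',
--         'pine nuts', 'cashews', 'macadamia',
--         'truffle', 'saffron', 'vanilla bean',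
--         'fresh herbs', 'specialty cheese'
--     )
--
--     def has_expensive(low):
--         # scan positions left to right; at each position try the keywords as a prefix there
--         return any(low.startswith(keywords, j) for j in range(len(low) + 1))
--
--     return [ing for ing in ingredients if has_expensive(ing.lower())]
-- ===== Notes on version B (the rewrite author's own statement) =====
-- stated objective: alternative
-- what changed: Replaces the keyword-major loop (each keyword scanned through the whole string with 'in' and a manual break) by a position-major scan: one pass over the string's positions, testing every keyword as a prefix at each position, with the outer loop collapsed into a filter comprehension.
import Mathlib
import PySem

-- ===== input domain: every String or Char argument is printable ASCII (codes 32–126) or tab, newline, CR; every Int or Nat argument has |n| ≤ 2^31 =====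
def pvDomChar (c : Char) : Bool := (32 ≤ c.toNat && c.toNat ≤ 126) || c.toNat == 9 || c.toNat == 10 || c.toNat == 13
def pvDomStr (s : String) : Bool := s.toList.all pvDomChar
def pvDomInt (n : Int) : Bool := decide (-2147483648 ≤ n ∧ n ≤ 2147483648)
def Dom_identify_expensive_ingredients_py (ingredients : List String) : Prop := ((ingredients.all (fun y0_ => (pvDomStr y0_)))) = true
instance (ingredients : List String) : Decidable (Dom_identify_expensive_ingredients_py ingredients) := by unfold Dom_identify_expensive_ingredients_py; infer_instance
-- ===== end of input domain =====

-- B replaces A's keyword-major loop (each keyword searched through the whole string) by a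
-- position-major scan (at each position, try every keyword as a prefix); alternative structure, same cost.

def pvExpensiveKeywords : List String :=
  ["salmon", "tuna", "shrimp", "lobster", "crab",
   "beef", "steak", "lamb", "veal",
   "organic", "grass-fed", "free-range",
   "pine nuts", "cashews", "macadamia",
   "truffle", "saffron", "vanilla bean",
   "fresh herbs", "specialty cheese"]

-- ===== PORT A =====
-- inner 'for keyword in expensive_keywords: if keyword in ingredient_lower: … break'
def pvKwLoop : List String → List Char → Bool
  | [], _ => false
  | k :: ks, low => if PySem.Chars.isIn k.toList low then true else pvKwLoop ks low

def identify_expensive_ingredients_py (ingredients : List String) : List String :=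
  ingredients.foldl
    (fun acc ingredient =>
      if pvKwLoop pvExpensiveKeywords (PySem.Chars.lower ingredient.toList) then
        acc ++ [ingredient]
      else acc)
    []

-- ===== PORT B =====
-- 'any(low.startswith(k, j) for j in range(len(low)+1) for k in keywords)':
-- walk the positions (suffixes) left to right, trying each keyword as a prefix there
def pvMatchHere (s : List Char) : Bool :=
  pvExpensiveKeywords.any (fun k => PySem.Chars.startswith s k.toList)

def pvSearch : List Char → Bool
  | [] => pvMatchHere []
  | c :: rest => pvMatchHere (c :: rest) || pvSearch rest

def identify_expensive_ingredients_py_alt (ingredients : List String) : List String :=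
  ingredients.filter (fun ing => pvSearch (PySem.Chars.lower ing.toList))

-- ===== PRECONDITION & SPEC =====
def Spec_identify_expensive_ingredients_py (ingredients : List String) (out : List String) : Prop := out = identify_expensive_ingredients_py_alt ingredients
instance (ingredients : List String) (out : List String) : Decidable (Spec_identify_expensive_ingredients_py ingredients out) := by unfold Spec_identify_expensive_ingredients_py; infer_instance

-- ===== CLAIM (what is proved, stated in full; the proofs are below) =====
def Claim_equal_identify_expensive_ingredients_py : Prop := ∀ (ingredients : List String), Dom_identify_expensive_ingredients_py ingredients → Spec_identify_expensive_ingredients_py ingredients (identify_expensive_ingredients_py ingredients)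

-- ===== LEMMAS AND PROOFS =====
lemma pvKwLoop_eq_any (ks : List String) (low : List Char) :
    pvKwLoop ks low = ks.any (fun k => PySem.Chars.isIn k.toList low) := by
  induction ks with
  | nil => rfl
  | cons k ks ih =>
      simp only [pvKwLoop, List.any_cons, ih]
      cases PySem.Chars.isIn k.toList low <;> simp

lemma pvSearch_iff (s : List Char) :
    pvSearch s = true ↔ ∃ k ∈ pvExpensiveKeywords, k.toList <:+: s := by
  induction s with
  | nil =>
      simp [pvSearch, pvMatchHere, PySem.Chars.startswith_iff, List.any_eq_true]
  | cons c rest ih =>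
      simp only [pvSearch, Bool.or_eq_true, ih, pvMatchHere, List.any_eq_true,
        PySem.Chars.startswith_iff]
      constructor
      · rintro (⟨k, hk, hp⟩ | ⟨k, hk, hi⟩)
        · exact ⟨k, hk, hp.isInfix⟩
        · exact ⟨k, hk, List.infix_cons hi⟩
      · rintro ⟨k, hk, hi⟩
        rcases List.infix_cons_iff.mp hi with hp | hi'
        · exact Or.inl ⟨k, hk, hp⟩
        · exact Or.inr ⟨k, hk, hi'⟩

lemma pvSearch_eq_kwLoop (low : List Char) :
    pvKwLoop pvExpensiveKeywords low = pvSearch low := by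
  rw [pvKwLoop_eq_any]
  rw [Bool.eq_iff_iff, List.any_eq_true, pvSearch_iff]
  simp [PySem.Chars.isIn_iff_infix]

-- ===== VERDICT (by name: the statement is the Claim_ definition above) =====
theorem identify_expensive_ingredients_py_spec : Claim_equal_identify_expensive_ingredients_py := by
  intro ingredients _
  unfold Spec_identify_expensive_ingredients_py identify_expensive_ingredients_py
    identify_expensive_ingredients_py_alt
  simp only [pvSearch_eq_kwLoop]
  rw [PySem.List.foldl_append_if_eq_filter]
  simp
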